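-- pv_equiv track=rewrite | github.com/Neeeraj27/strees_dost_web_system | app/services/popup_generator.py | _fallback_sequence
-- ===== SOURCE A (Python) =====
-- FALLBACK_TEMPLATES = {
--     "pressure": "They're preparing. You're panicking.",
--     "self_doubt": "You know you're not ready. So do they.",
--     "panic": "Clock's ticking. You're not.",
--     "motivation": "Dreams don't wait. Neither do results.",
--     "distraction": "Phone won. You lost. Again.",
-- }
--
-- def _fallback_sequence(emotion_signals: list[str] | None) -> list[str]:
--     ordered: list[str] = []
--     for signal in emotion_signals or []:
--         if signal in FALLBACK_TEMPLATES and signal not in ordered: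
--             ordered.append(signal)
--     for default in ["pressure", "self_doubt", "panic", "motivation", "distraction"]:
--         if default in FALLBACK_TEMPLATES and default not in ordered:
--             ordered.append(default)
--     return ordered
-- ===== SOURCE B (Python) =====
-- FALLBACK_TEMPLATES = {
--     "pressure": "They're preparing. You're panicking.",
--     "self_doubt": "You know you're not ready. So do they.",
--     "panic": "Clock's ticking. You're not.",
--     "motivation": "Dreams don't wait. Neither do results.",
--     "distraction": "Phone won. You lost. Again.",
-- }
--
-- def _fallback_sequence(emotion_signals):
--     # Rank each valid sig by first occurrence, then stably sort the fixed
--     # default key list by that rank (unmentioned keys share the sentinel rank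
--     # and keep their default order).
--     rank = {}
--     for sig in emotion_signals or []:
--         if sig in FALLBACK_TEMPLATES and sig not in rank:
--             rank[sig] = len(rank)
--     return sorted(["pressure", "self_doubt", "panic", "motivation", "distraction"],
--                   key=lambda k: rank.get(k, len(FALLBACK_TEMPLATES)))
-- ===== Notes on version B (the rewrite author's own statement) =====
-- stated objective: alternative
-- what changed: Replaces A's two append loops with linear membership scans of the growing output by a first-occurrence rank dict built in one pass plus a stable sort of the fixed five-key default list by that rank (sentinel rank for unmentioned keys).
import Mathlib
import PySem

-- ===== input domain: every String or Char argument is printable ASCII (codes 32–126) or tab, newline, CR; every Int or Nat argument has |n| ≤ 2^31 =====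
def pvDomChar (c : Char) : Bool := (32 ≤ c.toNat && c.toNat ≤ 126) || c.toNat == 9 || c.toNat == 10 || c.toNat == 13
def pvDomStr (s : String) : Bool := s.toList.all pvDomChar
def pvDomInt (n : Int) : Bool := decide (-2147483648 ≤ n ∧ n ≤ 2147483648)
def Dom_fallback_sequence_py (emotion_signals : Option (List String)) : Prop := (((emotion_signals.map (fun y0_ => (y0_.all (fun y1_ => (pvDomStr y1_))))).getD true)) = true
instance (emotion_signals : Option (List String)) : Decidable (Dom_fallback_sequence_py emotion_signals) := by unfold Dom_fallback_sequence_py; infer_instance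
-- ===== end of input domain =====

-- B replaces A's two membership-scanning append loops by a first-occurrence rank
-- table plus one stable sort of the fixed default key list (objective: alternative).

-- ===== PORT A =====
-- module-level constant FALLBACK_TEMPLATES (shared by both versions)
def fbTemplates : PySem.Dict String String := PySem.Dict.ofList
  [("pressure", "They're preparing. You're panicking."),
   ("self_doubt", "You know you're not ready. So do they."),
   ("panic", "Clock's ticking. You're not."),
   ("motivation", "Dreams don't wait. Neither do results."),
   ("distraction", "Phone won. You lost. Again.")]

def fallback_sequence_py (emotion_signals : Option (List String)) : List String :=
  let ordered : List String := (emotion_signals.getD []).foldl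
    (fun acc signal =>
      if fbTemplates.contains signal && !acc.contains signal then acc ++ [signal] else acc) []
  ["pressure", "self_doubt", "panic", "motivation", "distraction"].foldl
    (fun acc dflt =>
      if fbTemplates.contains dflt && !acc.contains dflt then acc ++ [dflt] else acc) ordered

-- ===== PORT B =====
def fallback_sequence_py_alt (emotion_signals : Option (List String)) : List String :=
  let rank : PySem.Dict String Int := (emotion_signals.getD []).foldl
    (fun d signal =>
      if fbTemplates.contains signal && !d.contains signal then d.insert signal (d.size : Int) else d)
    PySem.Dict.empty
  PySem.List.sorted ["pressure", "self_doubt", "panic", "motivation", "distraction"]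
    (fun k => rank.getD k (fbTemplates.size : Int)) false

-- ===== PRECONDITION & SPEC =====
def Spec_fallback_sequence_py (emotion_signals : Option (List String)) (out : List String) : Prop := out = fallback_sequence_py_alt emotion_signals
instance (emotion_signals : Option (List String)) (out : List String) : Decidable (Spec_fallback_sequence_py emotion_signals out) := by unfold Spec_fallback_sequence_py; infer_instance

-- ===== CLAIM (what is proved, stated in full; the proofs are below) =====
def Claim_equal_fallback_sequence_py : Prop := ∀ (emotion_signals : Option (List String)), Dom_fallback_sequence_py emotion_signals → Spec_fallback_sequence_py emotion_signals (fallback_sequence_py emotion_signals)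

-- ===== LEMMAS AND PROOFS =====

-- the fixed default key list (= the keys of fbTemplates)
def fbKeys : List String := ["pressure", "self_doubt", "panic", "motivation", "distraction"]

-- A's first loop / B's rank-building loop, as named step functions
def stepA (acc : List String) (signal : String) : List String :=
  if fbTemplates.contains signal && !acc.contains signal then acc ++ [signal] else acc

def stepB (d : PySem.Dict String Int) (signal : String) : PySem.Dict String Int :=
  if fbTemplates.contains signal && !d.contains signal then d.insert signal (d.size : Int) else d

-- the rank dict that B's loop builds for a deduplicated key list l
def rankOf (l : List String) : PySem.Dict String Int :=
  PySem.Dict.mk (l.zipIdx.map (fun p => (p.1, (p.2 : Int))))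

lemma keys_rankOf (l : List String) : (rankOf l).keys = l := by
  simp [rankOf, PySem.Dict.keys_mk, Function.comp_def]

lemma contains_rankOf (l : List String) (s : String) :
    (rankOf l).contains s = l.contains s := by
  rw [PySem.Dict.contains_eq_decide_mem_keys, keys_rankOf]
  simp

lemma size_rankOf (l : List String) : (rankOf l).size = l.length := by
  simp [rankOf, PySem.Dict.size]

lemma insert_rankOf (l : List String) (s : String) (h : l.contains s = false) :
    (rankOf l).insert s (l.length : Int) = rankOf (l ++ [s]) := by
  apply PySem.Dict.ext
  rw [PySem.Dict.items_insert_of_not_contains _ _ (by rw [contains_rankOf]; exact h)]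
  simp [rankOf, List.zipIdx_append]

-- B's loop computes exactly the rank dict of A's first-loop accumulator
lemma fold_rank (xs : List String) : ∀ acc : List String,
    xs.foldl stepB (rankOf acc) = rankOf (xs.foldl stepA acc) := by
  induction xs with
  | nil => intro acc; rfl
  | cons x xs ih =>
    intro acc
    simp only [List.foldl_cons]
    have hsA : stepA acc x =
        if fbTemplates.contains x && !acc.contains x then acc ++ [x] else acc := rfl
    by_cases hc : (fbTemplates.contains x && !acc.contains x) = true
    · have hb : stepB (rankOf acc) x = rankOf (acc ++ [x]) := by
        have hnc : acc.contains x = false := by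
          rcases Bool.and_eq_true_iff.mp hc with ⟨_, h2⟩
          simpa using h2
        simp only [stepB, contains_rankOf, hc, if_pos, size_rankOf]
        exact insert_rankOf acc x hnc
      rw [hb, hsA, if_pos hc, ih]
    · have hb : stepB (rankOf acc) x = rankOf acc := by
        simp only [stepB, contains_rankOf]
        rw [if_neg hc]
      rw [hb, hsA, if_neg hc, ih]

-- A's first loop keeps its accumulator a duplicate-free list of template keys
lemma contains_fb (x : String) : fbTemplates.contains x = true ↔ x ∈ fbKeys := by
  rw [PySem.Dict.contains_eq_decide_mem_keys]
  have h : fbTemplates.keys = fbKeys := by decide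
  rw [h]; simp

lemma canon_inv (xs : List String) : ∀ acc : List String,
    acc.Nodup → (∀ x ∈ acc, x ∈ fbKeys) →
    (xs.foldl stepA acc).Nodup ∧ ∀ x ∈ xs.foldl stepA acc, x ∈ fbKeys := by
  induction xs with
  | nil => intro acc h1 h2; exact ⟨h1, h2⟩
  | cons x xs ih =>
    intro acc h1 h2
    simp only [List.foldl_cons]
    by_cases hc : (fbTemplates.contains x && !acc.contains x) = true
    · rcases Bool.and_eq_true_iff.mp hc with ⟨hk, hnc⟩
      have hxa : x ∉ acc := by simpa using hnc
      have hs : stepA acc x = acc ++ [x] := by simp only [stepA]; rw [if_pos hc]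
      rw [hs]
      refine ih (acc ++ [x]) ?_ ?_
      · rw [List.nodup_append]
        refine ⟨h1, by simp, ?_⟩
        intro a ha b hb
        have hb' : b = x := by simpa using hb
        subst hb'
        intro hab; exact hxa (hab ▸ ha)
      · intro y hy
        rcases List.mem_append.mp hy with hy | hy
        · exact h2 y hy
        · have hyx : y = x := by simpa using hy
          subst hyx; exact (contains_fb y).mp hk
    · have : stepA acc x = acc := by simp only [stepA]; rw [if_neg hc]
      rw [this]; exact ih acc h1 h2

-- all lists over fbKeys of length exactly n
def fbTupN : Nat → List (List String)
  | 0 => [[]]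
  | n + 1 => fbKeys.flatMap (fun x => (fbTupN n).map (x :: ·))

lemma mem_fbTupN : ∀ (l : List String), (∀ x ∈ l, x ∈ fbKeys) → l ∈ fbTupN l.length := by
  intro l
  induction l with
  | nil => intro _; simp [fbTupN]
  | cons x t ih =>
    intro h
    simp only [List.length_cons, fbTupN, List.mem_flatMap, List.mem_map]
    exact ⟨x, h x (by simp), t, ih (fun y hy => h y (by simp [hy])), rfl⟩

-- all duplicate-free lists over fbKeys
def fbCandidates : List (List String) :=
  ((List.range 6).flatMap fbTupN).filter (fun l => decide l.Nodup)

lemma mem_fbCandidates (l : List String) (hn : l.Nodup) (hs : ∀ x ∈ l, x ∈ fbKeys) :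
    l ∈ fbCandidates := by
  have hlen : l.length < 6 := by
    have := List.Subperm.length_le (List.Nodup.subperm hn (fun x hx => hs x hx))
    simpa [fbKeys] using Nat.lt_succ_of_le this
  refine List.mem_filter.mpr ⟨List.mem_flatMap.mpr ⟨l.length, ?_, mem_fbTupN l hs⟩, by simpa using hn⟩
  simpa using hlen

-- the core identity, checked on all 326 possible accumulator values
set_option maxRecDepth 100000 in
lemma finite_check : ∀ l ∈ fbCandidates,
    PySem.List.sorted fbKeys (fun k => (rankOf l).getD k (5 : Int)) false
      = fbKeys.foldl stepA l := by decide

-- ===== VERDICT (by name: the statement is the Claim_ definition above) =====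
theorem fallback_sequence_py_spec : Claim_equal_fallback_sequence_py := by
  intro es _
  show fallback_sequence_py es = fallback_sequence_py_alt es
  have hA : fallback_sequence_py es
      = fbKeys.foldl stepA ((es.getD []).foldl stepA []) := rfl
  have hB : fallback_sequence_py_alt es
      = PySem.List.sorted fbKeys
          (fun k => ((es.getD []).foldl stepB (rankOf [])).getD k (fbTemplates.size : Int)) false := rfl
  have hsz : (fbTemplates.size : Int) = (5 : Int) := by decide
  have hinv := canon_inv (es.getD []) [] (by simp) (by simp)
  rw [hA, hB, hsz, fold_rank (es.getD []) []]
  exact (finite_check _ (mem_fbCandidates _ hinv.1 hinv.2)).symm
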